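-- pv_equiv track=rewrite | github.com/ipsbruno3/bitcoin-mnemonic-recovery | mnem.py | is_checksum_verification
-- ===== SOURCE A (Python) =====
-- def is_checksum_verification(s: str) -> bool:
--     toks = s.strip().split()
--     if not toks:
--         return False
--     if toks[0] == "?":
--         return False
--     if "?" not in toks:
--         return True
--     first_q = toks.index("?")
--     return all(t == "?" for t in toks[first_q:])
-- ===== SOURCE B (Python) =====
-- def is_checksum_verification(s: str) -> bool:
--     toks = s.strip().split()
--     words = [t for t in toks if t != "?"]
--     return bool(words) and toks == words + ["?"] * (len(toks) - len(words))
-- ===== Notes on version B (the rewrite author's own statement) =====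
-- stated objective: alternative
-- what changed: Replaces A's first-index scan and suffix all() check with a filter-and-reconstruct equality test: drop the question-mark tokens, then the string is valid iff the remaining words are nonempty and the token list equals the words followed by the right number of question-mark tokens.
import Mathlib
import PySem

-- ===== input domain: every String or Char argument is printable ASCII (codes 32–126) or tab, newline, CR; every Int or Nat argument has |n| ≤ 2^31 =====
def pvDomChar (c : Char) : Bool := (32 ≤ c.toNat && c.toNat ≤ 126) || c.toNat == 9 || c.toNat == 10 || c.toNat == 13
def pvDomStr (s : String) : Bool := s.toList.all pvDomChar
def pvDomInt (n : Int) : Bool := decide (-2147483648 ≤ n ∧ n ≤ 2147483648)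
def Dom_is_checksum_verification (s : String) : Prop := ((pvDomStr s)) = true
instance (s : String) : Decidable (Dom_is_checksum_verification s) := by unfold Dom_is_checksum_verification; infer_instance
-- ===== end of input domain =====

-- B replaces A's first-'?'-index scan and suffix all() with a filter-and-reconstruct equality test (alternative decomposition, same cost).

-- ===== PORT A =====
def is_checksum_verification (s : String) : Bool :=
  let toks := PySem.Str.split₀ (PySem.Str.strip s)
  match toks with
  | [] => false
  | t0 :: _ =>
    if t0 == "?" then false
    else if !(toks.contains "?") then true
    else
      -- Python's toks.index("?") cannot fail here (guarded by the membership test), so getD 0 is exact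
      let first_q := (PySem.List.index? toks "?").getD 0
      (PySem.List.slice toks (some (first_q : Int)) none).all (fun t => t == "?")

-- ===== PORT B =====
def is_checksum_verification_alt (s : String) : Bool :=
  let toks := PySem.Str.split₀ (PySem.Str.strip s)
  let words := toks.filter (fun t => !(t == "?"))
  !words.isEmpty && toks == words ++ List.replicate (toks.length - words.length) "?"

-- ===== PRECONDITION & SPEC =====
def Spec_is_checksum_verification (s : String) (out : Bool) : Prop := out = is_checksum_verification_alt s
instance (s : String) (out : Bool) : Decidable (Spec_is_checksum_verification s out) := by unfold Spec_is_checksum_verification; infer_instance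

-- ===== CLAIM (what is proved, stated in full; the proofs are below) =====
def Claim_equal_is_checksum_verification : Prop := ∀ (s : String), Dom_is_checksum_verification s → Spec_is_checksum_verification s (is_checksum_verification s)

-- ===== LEMMAS AND PROOFS =====

-- A's body on an arbitrary token list
def aCore (toks : List String) : Bool :=
  match toks with
  | [] => false
  | t0 :: _ =>
    if t0 == "?" then false
    else if !(toks.contains "?") then true
    else
      let first_q := (PySem.List.index? toks "?").getD 0
      (PySem.List.slice toks (some (first_q : Int)) none).all (fun t => t == "?")

-- B's body on an arbitrary token list
def bCore (toks : List String) : Bool :=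
  let words := toks.filter (fun t => !(t == "?"))
  !words.isEmpty && toks == words ++ List.replicate (toks.length - words.length) "?"

lemma bCore_append_q (l : List String) : bCore (l ++ ["?"]) = bCore l := by
  simp only [bCore, List.filter_append, List.filter_cons, List.filter_nil]
  have hf : (["?"].filter (fun t => !(t == "?"))) = ([] : List String) := by decide
  have hlen : (l.filter (fun t => !(t == "?"))).length ≤ l.length := List.length_filter_le _ _
  simp only [show (!("?" == "?")) = false from rfl]
  have hcnt : l.length + 1 - (l.filter (fun t => !(t == "?"))).length
      = (l.length - (l.filter (fun t => !(t == "?"))).length) + 1 := by omega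
  simp [hcnt, List.replicate_succ' (n := l.length - (l.filter (fun t => !(t == "?"))).length),
    ← List.append_assoc]

lemma bCore_append_x (l : List String) (x : String) (hx : x ≠ "?") :
    bCore (l ++ [x]) = !((l ++ [x]).contains "?") := by
  simp only [bCore, List.filter_append, List.filter_cons, List.filter_nil]
  have hxb : (!(x == "?")) = true := by simp [hx]
  simp only [hxb, if_true]
  have hlen : (l.filter (fun t => !(t == "?"))).length ≤ l.length := List.length_filter_le _ _
  by_cases hq : "?" ∈ l
  · -- some '?' in l: filter is strictly shorter, so the reconstruction ends in '?' ≠ x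
    have hlt : (l.filter (fun t => !(t == "?"))).length < l.length := by
      refine List.length_filter_lt_length_iff_exists.mpr ⟨"?", hq, by simp⟩
    have hne : ¬ (l ++ [x] = l.filter (fun t => !(t == "?")) ++
        x :: List.replicate (l.length - (l.filter (fun t => !(t == "?"))).length) "?") := by
      intro h
      have hk : l.length - (l.filter (fun t => !(t == "?"))).length
          = (l.length - (l.filter (fun t => !(t == "?"))).length - 1) + 1 := by omega
      rw [hk, List.replicate_succ'] at h
      have := congrArg List.getLast? h
      rw [show l.filter (fun t => !(t == "?")) ++
            x :: (List.replicate (l.length - (l.filter (fun t => !(t == "?"))).length - 1) "?" ++ ["?"])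
          = (l.filter (fun t => !(t == "?")) ++
            x :: List.replicate (l.length - (l.filter (fun t => !(t == "?"))).length - 1) "?") ++ ["?"]
        by simp] at this
      rw [List.getLast?_concat, List.getLast?_concat] at this
      exact hx (Option.some.inj this)
    simp [List.contains_eq_mem, hq, hne]
  · -- no '?' in l: filter keeps everything
    have hfe : l.filter (fun t => !(t == "?")) = l := by
      apply List.filter_eq_self.mpr
      intro a ha; simp; intro h; exact hq (h ▸ ha)
    simp [hfe, List.contains_eq_mem, hq, Ne.symm hx]

lemma aCore_append_q (l : List String) : aCore (l ++ ["?"]) = aCore l := by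
  cases l with
  | nil => rfl
  | cons t0 l' =>
    simp only [aCore]
    by_cases h0 : t0 = "?"
    · simp [h0]
    · simp only [beq_iff_eq]
      by_cases hq : "?" ∈ t0 :: l'
      · have hc : ((t0 :: l') ++ ["?"]).contains "?" = true := by
          simp [List.contains_eq_mem]
        have hc' : (t0 :: l').contains "?" = true := by
          simp [List.contains_eq_mem, hq]
        simp only [hc, hc', Bool.not_true]
        rw [PySem.List.index?_append_of_mem ["?"] hq]
        obtain ⟨k, hk⟩ : ∃ k, PySem.List.index? (t0 :: l') "?" = some k :=
          Option.isSome_iff_exists.mp (by rw [PySem.List.index?_isSome_iff]; exact hq)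
        obtain ⟨hklt, -, -⟩ := PySem.List.getElem_of_index?_eq_some hk
        simp only [hk, Option.getD_some, PySem.List.slice_from_natCast]
        rw [List.drop_append_of_le_length (by omega)]
        simp [h0]
      · have hc : ((t0 :: l') ++ ["?"]).contains "?" = true := by
          simp [List.contains_eq_mem]
        have hc' : (t0 :: l').contains "?" = false := by
          simp [List.contains_eq_mem, hq]
        have hidx : List.idxOf? "?" (t0 :: (l' ++ ["?"])) = some (l'.length + 1) := by
          have h := PySem.List.index?_append_singleton_self (l := t0 :: l') (c := "?") hq
          simpa using h
        simp only [hc, hc', Bool.not_true, Bool.not_false, Bool.false_eq_true, if_false, if_true]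
        simp [hidx, h0]
        intro y hy
        rw [show ((l'.length : Int) + 1) = ((l'.length + 1 : Nat) : Int) by push_cast; ring,
            PySem.List.slice_from_natCast] at hy
        simpa [List.drop_left] using hy

lemma aCore_append_x (l : List String) (x : String) (hx : x ≠ "?") :
    aCore (l ++ [x]) = !((l ++ [x]).contains "?") := by
  cases l with
  | nil => simp [aCore, List.contains_eq_mem, hx, Ne.symm hx]
  | cons t0 l' =>
    simp only [aCore]
    by_cases h0 : t0 = "?"
    · simp [h0, List.contains_eq_mem]
    · simp only [beq_iff_eq]
      by_cases hq : "?" ∈ t0 :: l'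
      · have hc : ((t0 :: l') ++ [x]).contains "?" = true := by
          rcases List.mem_cons.mp hq with h | h <;> simp [List.contains_eq_mem, h]
        simp only [hc, Bool.not_true]
        rw [PySem.List.index?_append_of_mem [x] hq]
        obtain ⟨k, hk⟩ : ∃ k, PySem.List.index? (t0 :: l') "?" = some k :=
          Option.isSome_iff_exists.mp (by rw [PySem.List.index?_isSome_iff]; exact hq)
        obtain ⟨hklt, -, -⟩ := PySem.List.getElem_of_index?_eq_some hk
        simp only [hk, Option.getD_some, PySem.List.slice_from_natCast]
        rw [List.drop_append_of_le_length (by omega)]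
        simp [hx]
      · have hq2 : ¬("?" = t0) ∧ "?" ∉ l' := by simpa [List.mem_cons] using hq
        simp [h0, hq2.1, hq2.2, Ne.symm hx]

lemma core (l : List String) : aCore l = bCore l := by
  induction l using List.reverseRecOn with
  | nil => rfl
  | append_singleton l x ih =>
    by_cases hx : x = "?"
    · subst hx; rw [aCore_append_q, bCore_append_q, ih]
    · rw [aCore_append_x l x hx, bCore_append_x l x hx]

-- ===== VERDICT (by name: the statement is the Claim_ definition above) =====
theorem is_checksum_verification_spec : Claim_equal_is_checksum_verification := by
  intro s _
  unfold Spec_is_checksum_verification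
  exact core (PySem.Str.split₀ (PySem.Str.strip s))
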